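-- pv_equiv track=rewrite | github.com/tgstation/tgstation | tools/mapmerge/map_helpers.py | get_next_key
-- ===== SOURCE A (Python) =====
-- def get_next_key(key, key_length):
--     if key == "":
--         return "".join("a" for _ in range(key_length))
--
--     length = len(key)
--     new_key = ""
--     carry = 1
--     for char in key[::-1]:
--         if carry <= 0:
--             new_key = new_key + char
--             continue
--         if char == 'Z':
--             new_key = new_key + 'a'
--             carry += 1
--             length -= 1
--             if length <= 0:
--                 return "OVERFLOW"
--         elif char == 'z':
--             new_key = new_key + 'A'
--         else:
--             new_key = new_key + chr(ord(char) + 1)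
--         if carry > 0:
--             carry -= 1
--     return new_key[::-1]
-- ===== SOURCE B (Python) =====
-- def get_next_key(key, key_length):
--     if key == "":
--         return "a" * key_length
--     stripped = key.rstrip('Z')
--     if stripped == "":
--         return "OVERFLOW"
--     num_z = len(key) - len(stripped)
--     pivot = stripped[-1]
--     new_pivot = 'A' if pivot == 'z' else chr(ord(pivot) + 1)
--     return stripped[:-1] + new_pivot + 'a' * num_z
-- ===== Notes on version B (the rewrite author's own statement) =====
-- stated objective: simpler
-- what changed: Replaces the reversed carry-propagation loop with a three-way split: rstrip the trailing 'Z' run, bump the single pivot character, and append that many 'a's.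
import Mathlib
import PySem

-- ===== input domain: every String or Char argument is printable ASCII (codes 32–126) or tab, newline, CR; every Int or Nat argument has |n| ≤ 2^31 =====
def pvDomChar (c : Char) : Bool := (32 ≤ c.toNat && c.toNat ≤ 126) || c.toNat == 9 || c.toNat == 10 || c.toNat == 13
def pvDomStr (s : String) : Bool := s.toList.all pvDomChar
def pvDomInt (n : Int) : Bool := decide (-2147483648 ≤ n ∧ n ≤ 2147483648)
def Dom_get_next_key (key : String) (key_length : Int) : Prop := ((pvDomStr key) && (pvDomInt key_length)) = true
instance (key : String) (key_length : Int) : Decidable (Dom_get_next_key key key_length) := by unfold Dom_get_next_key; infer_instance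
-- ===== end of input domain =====

-- B replaces A's reversed carry-propagation loop by a three-way split (strip the
-- trailing 'Z' run, bump the pivot character, append that many 'a's); objective: simpler.


-- ===== PORT A =====
-- A's for-loop over key[::-1] with state (new_key, carry, length); the early
-- 'return "OVERFLOW"' is modelled as none.
def gnkLoop : List Char → List Char → Int → Int → Option (List Char)
  | [], new_key, _, _ => some new_key
  | c :: rest, new_key, carry, length =>
    if carry ≤ 0 then gnkLoop rest (new_key ++ [c]) carry length
    else if c = 'Z' then
      let carry' := carry + 1
      let length' := length - 1
      if length' ≤ 0 then none
      else gnkLoop rest (new_key ++ ['a']) (if carry' > 0 then carry' - 1 else carry') length'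
    else if c = 'z' then
      gnkLoop rest (new_key ++ ['A']) (if carry > 0 then carry - 1 else carry) length
    else
      gnkLoop rest (new_key ++ [Char.ofNat (c.toNat + 1)]) (if carry > 0 then carry - 1 else carry) length

def get_next_key (key : String) (key_length : Int) : String :=
  if key = "" then
    -- "".join("a" for _ in range(key_length))
    String.ofList ((PySem.List.pyRange 0 key_length 1).map (fun _ => 'a'))
  else
    -- key[::-1] is reverse (PySem.List.slice?_none_none_neg_one)
    match gnkLoop key.toList.reverse [] 1 (key.toList.length : Int) with
    | none => "OVERFLOW"
    | some new_key => String.ofList new_key.reverse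

-- ===== PORT B =====
def get_next_key_alt (key : String) (key_length : Int) : String :=
  if key = "" then
    String.ofList (List.replicate key_length.toNat 'a')  -- "a" * key_length ('' for negative)
  else
    let rev := key.toList.reverse
    -- key.rstrip('Z') = (rev.dropWhile (== 'Z')).reverse; ported on the reversed list:
    -- pivot = stripped[-1] is its head, stripped[:-1] is rest.reverse.
    match rev.dropWhile (· == 'Z') with
    | [] => "OVERFLOW"                                -- stripped == ""
    | pivot :: rest =>
      let num_z := (rev.takeWhile (· == 'Z')).length  -- len(key) - len(stripped)
      String.ofList (rest.reverse
        ++ [if pivot = 'z' then 'A' else Char.ofNat (pivot.toNat + 1)]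
        ++ List.replicate num_z 'a')

-- ===== PRECONDITION & SPEC =====
def Spec_get_next_key (key : String) (key_length : Int) (out : String) : Prop := out = get_next_key_alt key key_length
instance (key : String) (key_length : Int) (out : String) : Decidable (Spec_get_next_key key key_length out) := by unfold Spec_get_next_key; infer_instance

-- ===== CLAIM (what is proved, stated in full; the proofs are below) =====
def Claim_equal_get_next_key : Prop := ∀ (key : String) (key_length : Int), Dom_get_next_key key key_length → Spec_get_next_key key key_length (get_next_key key key_length)

-- ===== LEMMAS AND PROOFS =====

-- once the carry is spent, the loop copies the remaining characters verbatim
theorem gnkLoop_zero (rest : List Char) : ∀ (acc : List Char) (L : Int),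
    gnkLoop rest acc 0 L = some (acc ++ rest) := by
  induction rest with
  | nil => intro acc L; simp [gnkLoop]
  | cons c cs ih => intro acc L; simp [gnkLoop, ih]

-- characterisation of A's loop started with carry 1 and length = |input|
theorem gnkLoop_main (rev : List Char) : ∀ (acc : List Char) (L : Int),
    rev ≠ [] → L = (rev.length : Int) →
    gnkLoop rev acc 1 L =
      match rev.dropWhile (· == 'Z') with
      | [] => none
      | p :: pre => some (acc ++ List.replicate (rev.takeWhile (· == 'Z')).length 'a'
          ++ [if p = 'z' then 'A' else Char.ofNat (p.toNat + 1)] ++ pre) := by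
  induction rev with
  | nil => intro _ _ h _; exact absurd rfl h
  | cons c cs ih =>
    intro acc L _ hL
    by_cases hZ : c = 'Z'
    · subst hZ
      rw [List.dropWhile_cons_of_pos (by simp), List.takeWhile_cons_of_pos (by simp)]
      rcases List.eq_nil_or_concat cs |>.symm with h | h
      · -- cs nonempty: no overflow yet, recurse
        have hcs : cs ≠ [] := by rcases h with ⟨ys, y, rfl⟩; simp
        have hlen : ¬ (L - 1 ≤ 0) := by
          rcases h with ⟨ys, y, rfl⟩; simp at hL; omega
        have hrec : L - 1 = (cs.length : Int) := by simp at hL; omega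
        simp only [gnkLoop]
        norm_num
        rw [if_neg (show ¬ L ≤ 1 by omega), ih (acc ++ ['a']) (L - 1) hcs hrec]
        cases cs.dropWhile (· == 'Z') with
        | nil => simp
        | cons p pre => simp [List.replicate_succ]
      · -- cs = []: length hits 0 → OVERFLOW
        subst h
        have h0 : L - 1 ≤ 0 := by simp at hL; omega
        simp [gnkLoop, h0]
    · -- c is the pivot: one bump, then carry 0 copies the rest
      rw [List.dropWhile_cons_of_neg (by simp [hZ]), List.takeWhile_cons_of_neg (by simp [hZ])]
      by_cases hz : c = 'z'
      · subst hz
        simp [gnkLoop, gnkLoop_zero]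
      · simp [gnkLoop, hZ, hz, gnkLoop_zero]

theorem get_next_key_eq (key : String) (key_length : Int) :
    get_next_key key key_length = get_next_key_alt key key_length := by
  by_cases hk : key = ""
  · subst hk
    simp [get_next_key, get_next_key_alt, List.map_const', PySem.List.length_pyRange_one]
  · simp only [get_next_key, get_next_key_alt, if_neg hk]
    have hne : key.toList.reverse ≠ [] := by
      intro h
      apply hk
      have h2 : key.toList = [] := by simpa using congrArg List.reverse h
      simpa using congrArg String.ofList h2
    rw [gnkLoop_main key.toList.reverse [] (key.toList.length : Int) hne (by simp)]
    cases key.toList.reverse.dropWhile (· == 'Z') with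
    | nil => simp
    | cons p pre =>
      simp [List.reverse_append, List.reverse_replicate]

-- ===== VERDICT (by name: the statement is the Claim_ definition above) =====
theorem get_next_key_spec : Claim_equal_get_next_key := by
  intro key key_length _
  unfold Spec_get_next_key
  exact get_next_key_eq key key_length
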